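-- pv_equiv track=rewrite | github.com/Aljosa3/senti_system | senti_os/core/faza30_9/plan_builder.py | _determine_build_order
-- ===== SOURCE A (Python) =====
-- from typing import Dict, List, Any, Optional
--
-- def _determine_build_order(architecture: Dict[str, Any]) -> List[str]:
--     """Determine build order for components."""
--     build_order = []
--
--     components = architecture.get("components", [])
--     if not components:
--         build_order = ["main"]
--     else:
--         # Build core components first
--         for comp in components:
--             name = comp.get("name", "")
--             if "core" in name.lower() or "base" in name.lower():
--                 build_order.append(name)
--
--         # Then interface components
--         for comp in components:
--             name = comp.get("name", "")
--             if name not in build_order: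
--                 build_order.append(name)
--
--     return build_order
-- ===== SOURCE B (Python) =====
-- def _determine_build_order(architecture):
--     """Determine build order for components."""
--     components = architecture.get("components", [])
--     if not components:
--         return ["main"]
--     cores = []
--     rest = []
--     seen = set()
--     for comp in components:
--         name = comp.get("name", "")
--         low = name.lower()
--         if "core" in low or "base" in low:
--             cores.append(name)
--         elif name not in seen:
--             rest.append(name)
--             seen.add(name)
--     return cores + rest
-- ===== Notes on version B (the rewrite author's own statement) =====
-- stated objective: alternative
-- what changed: Replaces A's two full scans (core pass, then a rest pass with a linear 'name not in build_order' membership test on the growing result) by a single pass that partitions components into a duplicates-kept core list and a first-seen rest list deduplicated via a seen set, then concatenates them; correctness relies on core-ness being a function of the name alone.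
import Mathlib
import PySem

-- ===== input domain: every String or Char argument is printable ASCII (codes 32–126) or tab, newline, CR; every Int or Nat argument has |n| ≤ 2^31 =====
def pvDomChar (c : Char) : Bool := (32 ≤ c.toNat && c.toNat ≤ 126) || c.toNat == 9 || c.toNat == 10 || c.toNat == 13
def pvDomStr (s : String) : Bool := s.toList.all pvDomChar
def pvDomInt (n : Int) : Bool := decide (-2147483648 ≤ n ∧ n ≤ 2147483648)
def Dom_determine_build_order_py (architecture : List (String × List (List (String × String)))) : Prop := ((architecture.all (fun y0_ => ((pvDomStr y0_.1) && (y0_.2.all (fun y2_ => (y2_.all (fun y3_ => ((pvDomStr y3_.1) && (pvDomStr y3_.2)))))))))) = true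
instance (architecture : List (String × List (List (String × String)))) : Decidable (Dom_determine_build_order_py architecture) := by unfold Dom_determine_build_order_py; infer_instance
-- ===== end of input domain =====

-- B makes one pass over the components, partitioning into a kept-duplicates core list and a
-- first-seen-deduplicated rest list, instead of A's two full scans with a linear membership test.

-- ===== PORT A =====
def determine_build_order_py (architecture : List (String × List (List (String × String)))) : List String :=
  let components := PySem.Dict.getD ⟨architecture⟩ "components" []
  if components.isEmpty then ["main"]
  else
    -- first pass: core/base components
    let bo := components.foldl (fun bo comp =>
      let name := PySem.Dict.getD ⟨comp⟩ "name" ""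
      if PySem.Str.isIn "core" (PySem.Str.lower name) || PySem.Str.isIn "base" (PySem.Str.lower name)
      then bo ++ [name] else bo) []
    -- second pass: the rest, skipping names already present
    components.foldl (fun bo comp =>
      let name := PySem.Dict.getD ⟨comp⟩ "name" ""
      if bo.contains name then bo else bo ++ [name]) bo

-- ===== PORT B =====
def determine_build_order_py_alt (architecture : List (String × List (List (String × String)))) : List String :=
  let components := PySem.Dict.getD ⟨architecture⟩ "components" []
  if components.isEmpty then ["main"]
  else
    let st := components.foldl
      (fun (st : List String × List String × PySem.Set String) comp =>
        let name := PySem.Dict.getD ⟨comp⟩ "name" ""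
        let low := PySem.Str.lower name
        if PySem.Str.isIn "core" low || PySem.Str.isIn "base" low then
          (st.1 ++ [name], st.2.1, st.2.2)
        else if PySem.Set.contains st.2.2 name then st
        else (st.1, st.2.1 ++ [name], PySem.Set.add st.2.2 name))
      ([], [], PySem.Set.empty)
    st.1 ++ st.2.1

-- ===== PRECONDITION & SPEC =====
def Spec_determine_build_order_py (architecture : List (String × List (List (String × String)))) (out : List String) : Prop := out = determine_build_order_py_alt architecture
instance (architecture : List (String × List (List (String × String)))) (out : List String) : Decidable (Spec_determine_build_order_py architecture out) := by unfold Spec_determine_build_order_py; infer_instance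

-- ===== CLAIM (what is proved, stated in full; the proofs are below) =====
def Claim_equal_determine_build_order_py : Prop := ∀ (architecture : List (String × List (List (String × String)))), Dom_determine_build_order_py architecture → Spec_determine_build_order_py architecture (determine_build_order_py architecture)

-- ===== LEMMAS AND PROOFS =====

def pvName (comp : List (String × String)) : String := PySem.Dict.getD ⟨comp⟩ "name" ""

def pvIsCore (n : String) : Bool :=
  PySem.Str.isIn "core" (PySem.Str.lower n) || PySem.Str.isIn "base" (PySem.Str.lower n)

def pvStepA (bo : List String) (comp : List (String × String)) : List String :=
  if bo.contains (pvName comp) then bo else bo ++ [pvName comp]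

def pvStepB (st : List String × List String × PySem.Set String) (comp : List (String × String)) :
    List String × List String × PySem.Set String :=
  if pvIsCore (pvName comp) then (st.1 ++ [pvName comp], st.2.1, st.2.2)
  else if PySem.Set.contains st.2.2 (pvName comp) then st
  else (st.1, st.2.1 ++ [pvName comp], PySem.Set.add st.2.2 (pvName comp))

-- the rest/seen part of B's fold (cores is independent of it)
def pvRestFold (comps : List (List (String × String))) (r : List String) (s : PySem.Set String) :
    List String × PySem.Set String :=
  match comps with
  | [] => (r, s)
  | comp :: t =>
    if pvIsCore (pvName comp) then pvRestFold t r s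
    else if PySem.Set.contains s (pvName comp) then pvRestFold t r s
    else pvRestFold t (r ++ [pvName comp]) (PySem.Set.add s (pvName comp))

lemma pvFoldB_split (comps : List (List (String × String))) (c r : List String) (s : PySem.Set String) :
    comps.foldl pvStepB (c, r, s) =
      (c ++ (comps.filter (fun comp => pvIsCore (pvName comp))).map pvName, pvRestFold comps r s) := by
  induction comps generalizing c r s with
  | nil => simp [pvRestFold]
  | cons comp t ih =>
    simp only [List.foldl_cons, pvStepB, pvRestFold, List.filter_cons]
    by_cases hc : pvIsCore (pvName comp)
    · simp [hc, ih]
    · by_cases hm : pvName comp ∈ s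
      · simp [hc, hm, ih]
      · simp [hc, hm, ih]

lemma pvFoldA_eq (comps : List (List (String × String))) (C r : List String) (s : PySem.Set String)
    (hC : ∀ x ∈ C, pvIsCore x = true)
    (hall : ∀ comp ∈ comps, pvIsCore (pvName comp) = true → pvName comp ∈ C)
    (hs : ∀ x, PySem.Set.contains s x = true ↔ x ∈ r)
    (hr : ∀ x ∈ r, pvIsCore x = false) :
    comps.foldl pvStepA (C ++ r) = C ++ (pvRestFold comps r s).1 := by
  induction comps generalizing r s with
  | nil => simp [pvRestFold]
  | cons comp t ih =>
    simp only [List.foldl_cons, pvStepA, pvRestFold]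
    by_cases hc : pvIsCore (pvName comp)
    · have hmem : pvName comp ∈ C := hall comp (by simp) hc
      have : (C ++ r).contains (pvName comp) = true := by
        simp; exact Or.inl hmem
      simp only [hc, this, if_true]
      exact ih r s (fun comp' h' => hall comp' (by simp [h'])) hs hr
    · have hnotC : pvName comp ∉ C := fun h => by simp [hC _ h] at hc
      by_cases hin : pvName comp ∈ r
      · have h1 : (C ++ r).contains (pvName comp) = true := by
          simp; exact Or.inr hin
        have h2 : PySem.Set.contains s (pvName comp) = true := (hs _).mpr hin
        simp only [hc, h1, if_true, h2]
        exact ih r s (fun comp' h' => hall comp' (by simp [h'])) hs hr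
      · have h1 : (C ++ r).contains (pvName comp) = false := by
          simp; exact ⟨fun h => hnotC h, fun h => hin h⟩
        have h2 : PySem.Set.contains s (pvName comp) = false := by
          rcases h : PySem.Set.contains s (pvName comp) with _ | _
          · rfl
          · exact absurd ((hs _).mp h) hin
        simp only [hc, if_false, h1, h2, Bool.false_eq_true, if_false]
        rw [List.append_assoc] at *
        exact ih (r ++ [pvName comp]) (PySem.Set.add s (pvName comp))
          (fun comp' h' => hall comp' (by simp [h']))
          (fun x => by
            rw [PySem.Set.contains_iff, PySem.Set.mem_add, List.mem_append, List.mem_singleton]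
            rw [← hs x, PySem.Set.contains_iff])
          (fun x hx => by
            rcases List.mem_append.mp hx with h | h
            · exact hr x h
            · simp at h; subst h; simpa using hc)

-- ===== VERDICT (by name: the statement is the Claim_ definition above) =====
theorem determine_build_order_py_spec : Claim_equal_determine_build_order_py := by
  intro architecture _
  unfold Spec_determine_build_order_py determine_build_order_py determine_build_order_py_alt
  set comps := PySem.Dict.getD ⟨architecture⟩ "components" ([] : List (List (String × String))) with hcomps
  by_cases h : comps.isEmpty
  · simp [h]
  · simp only [h, if_false, Bool.false_eq_true]
    have hB : comps.foldl
        (fun (st : List String × List String × PySem.Set String) comp =>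
          let name := PySem.Dict.getD ⟨comp⟩ "name" ""
          let low := PySem.Str.lower name
          if PySem.Str.isIn "core" low || PySem.Str.isIn "base" low then
            (st.1 ++ [name], st.2.1, st.2.2)
          else if PySem.Set.contains st.2.2 name then st
          else (st.1, st.2.1 ++ [name], PySem.Set.add st.2.2 name))
        ([], [], PySem.Set.empty)
        = comps.foldl pvStepB ([], [], PySem.Set.empty) := rfl
    have hA1 : comps.foldl
        (fun (bo : List String) comp =>
          let name := PySem.Dict.getD ⟨comp⟩ "name" ""
          if PySem.Str.isIn "core" (PySem.Str.lower name) || PySem.Str.isIn "base" (PySem.Str.lower name)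
          then bo ++ [name] else bo) []
        = comps.foldl (fun bo comp => if pvIsCore (pvName comp) then bo ++ [pvName comp] else bo) [] := rfl
    have hA2 : ∀ (init : List String), comps.foldl
        (fun (bo : List String) comp =>
          let name := PySem.Dict.getD ⟨comp⟩ "name" ""
          if bo.contains name then bo else bo ++ [name]) init
        = comps.foldl pvStepA init := fun _ => rfl
    rw [hB, hA1, hA2, pvFoldB_split]
    rw [PySem.List.foldl_append_if (fun comp => pvIsCore (pvName comp)) pvName]
    set C := (comps.filter (fun comp => pvIsCore (pvName comp))).map pvName with hCdef
    have := pvFoldA_eq comps C [] PySem.Set.empty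
      (fun x hx => by
        rcases List.mem_map.mp hx with ⟨comp, hcomp, hx'⟩
        subst hx'; exact (List.mem_filter.mp hcomp).2)
      (fun comp hcomp hc => List.mem_map.mpr ⟨comp, List.mem_filter.mpr ⟨hcomp, hc⟩, rfl⟩)
      (fun x => by simp [PySem.Set.empty])
      (fun x hx => absurd hx (List.not_mem_nil))
    simpa using this
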